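-- pv_equiv track=rewrite | github.com/AMYMEME/algorithm-study | amymeme/20210706/징검다리 건너기.py | check
-- ===== SOURCE A (Python) =====
-- def check(stones, less_than):
--     cnt = 0
--     max_cnt = 0
--     for idx, stone in enumerate(stones):
--         if stone <= less_than:
--             cnt += 1
--             max_cnt = max(max_cnt, cnt)
--         else:
--             cnt = 0
--     return max_cnt
-- ===== SOURCE B (Python) =====
-- def check(stones, less_than):
--     # Group-then-reduce: collect the lengths of maximal runs of stones <= less_than,
--     # then take the maximum run length (0 when there is no such run).
--     lengths = []
--     i, n = 0, len(stones)
--     while i < n: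
--         if stones[i] <= less_than:
--             j = i
--             while j < n and stones[j] <= less_than:
--                 j += 1
--             lengths.append(j - i)
--             i = j
--         else:
--             i += 1
--     return max(lengths, default=0)
-- ===== Notes on version B (the rewrite author's own statement) =====
-- stated objective: alternative
-- what changed: Replaces the running-counter-with-reset accumulator by a group-then-reduce decomposition: scan out each maximal run of stones <= less_than, collect the run lengths, and return their maximum (default 0).
import Mathlib
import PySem

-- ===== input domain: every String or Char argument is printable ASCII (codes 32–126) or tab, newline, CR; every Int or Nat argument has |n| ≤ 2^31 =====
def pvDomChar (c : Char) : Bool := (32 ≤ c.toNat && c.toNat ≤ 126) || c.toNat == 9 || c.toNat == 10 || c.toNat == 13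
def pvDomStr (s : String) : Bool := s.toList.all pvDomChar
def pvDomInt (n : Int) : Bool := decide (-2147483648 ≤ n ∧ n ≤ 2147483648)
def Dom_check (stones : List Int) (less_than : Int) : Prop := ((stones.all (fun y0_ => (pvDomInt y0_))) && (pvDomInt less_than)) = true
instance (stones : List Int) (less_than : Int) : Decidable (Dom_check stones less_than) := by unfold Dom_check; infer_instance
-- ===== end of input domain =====

-- B is a group-then-reduce re-implementation (collect maximal-run lengths, take their max);
-- an alternative decomposition of the same O(n) scan, not claimed faster.

-- ===== PORT A =====
-- A's loop is `for idx, stone in enumerate(stones)` with idx unused: ported as a fold over stones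
-- carrying the state (cnt, max_cnt).
def check (stones : List Int) (less_than : Int) : Int :=
  (stones.foldl
    (fun (st : Int × Int) stone =>
      if stone ≤ less_than then (st.1 + 1, max st.2 (st.1 + 1)) else (0, st.2))
    (0, 0)).2

-- ===== PORT B =====
-- The lengths of the maximal runs of stones ≤ less_than, in order (Source B's outer while loop:
-- at a qualifying stone scan the whole run at once, append its length, jump past it).
def altRuns (less_than : Int) : List Int → List Int
  | [] => []
  | x :: xs =>
    if x ≤ less_than then
      (((x :: xs).takeWhile (fun s => decide (s ≤ less_than))).length : Int)
        :: altRuns less_than ((x :: xs).dropWhile (fun s => decide (s ≤ less_than)))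
    else altRuns less_than xs
termination_by l => l.length
decreasing_by
  · simp only [List.dropWhile]
    have h1 : (decide (x ≤ less_than)) = true := by simpa using ‹x ≤ less_than›
    rw [h1]
    simpa using Nat.lt_succ_of_le (List.length_dropWhile_le _ _)
  · simp

-- max(lengths, default=0)
def check_alt (stones : List Int) (less_than : Int) : Int :=
  (altRuns less_than stones).foldl max 0

-- ===== PRECONDITION & SPEC =====
def Spec_check (stones : List Int) (less_than : Int) (out : Int) : Prop := out = check_alt stones less_than
instance (stones : List Int) (less_than : Int) (out : Int) : Decidable (Spec_check stones less_than out) := by unfold Spec_check; infer_instance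

-- ===== CLAIM (what is proved, stated in full; the proofs are below) =====
def Claim_equal_check : Prop := ∀ (stones : List Int) (less_than : Int), Dom_check stones less_than → Spec_check stones less_than (check stones less_than)

-- ===== LEMMAS AND PROOFS =====

-- A's loop body, named for the lemmas.
def stepA (lt : Int) (st : Int × Int) (stone : Int) : Int × Int :=
  if stone ≤ lt then (st.1 + 1, max st.2 (st.1 + 1)) else (0, st.2)

theorem check_eq_foldl (stones : List Int) (lt : Int) :
    check stones lt = (stones.foldl (stepA lt) (0, 0)).2 := rfl

-- folding max distributes over the seed
theorem foldl_max_max (a b : Int) (l : List Int) :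
    l.foldl max (max a b) = max a (l.foldl max b) := by
  induction l generalizing b with
  | nil => rfl
  | cons c l ih =>
    simp only [List.foldl]
    rw [max_assoc, ih]

-- A's fold over a block of all-qualifying stones
theorem foldA_all_le (lt : Int) (xs : List Int) (h : ∀ x ∈ xs, x ≤ lt) (c m : Int) :
    xs.foldl (stepA lt) (c, m) =
      (c + xs.length, if xs.length = 0 then m else max m (c + xs.length)) := by
  induction xs generalizing c m with
  | nil => simp
  | cons x xs ih =>
    have hx : x ≤ lt := h x (by simp)
    simp only [List.foldl, stepA, if_pos hx]
    rw [ih (fun y hy => h y (by simp [hy]))]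
    by_cases h0 : xs.length = 0
    · simp [h0]
    · have h1 : xs.length + 1 ≠ 0 := by omega
      simp only [if_neg h0, List.length_cons, if_neg h1]
      have hlen : (0:Int) ≤ (xs.length : Int) := Int.natCast_nonneg _
      simp only [Prod.mk.injEq]
      constructor
      · push_cast; omega
      · simp only [max_def]
        push_cast
        split_ifs <;> omega

-- main invariant: resuming A's fold with cnt = 0 and max so far m
theorem foldA_zero (lt : Int) : ∀ (xs : List Int), ∀ m : Int, 0 ≤ m →
    (xs.foldl (stepA lt) (0, m)).2 = max m ((altRuns lt xs).foldl max 0) := by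
  intro xs
  induction xs using altRuns.induct lt with
  | case1 => intro m hm; simp [altRuns]; omega
  | case2 x xs hx ih =>
    intro m hm
    -- x ≤ lt : split off the leading run
    have hdecomp : x :: xs =
        ((x :: xs).takeWhile (fun s => decide (s ≤ lt))) ++
        ((x :: xs).dropWhile (fun s => decide (s ≤ lt))) :=
      (List.takeWhile_append_dropWhile).symm
    set t := (x :: xs).takeWhile (fun s => decide (s ≤ lt)) with ht
    set d := (x :: xs).dropWhile (fun s => decide (s ≤ lt)) with hd
    have htle : ∀ y ∈ t, y ≤ lt := by
      intro y hy
      have := List.mem_takeWhile_imp hy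
      simpa using this
    have htlen : t.length ≠ 0 := by
      rw [ht]
      simp [List.takeWhile, hx]
    conv_lhs => rw [hdecomp]
    rw [List.foldl_append, foldA_all_le lt t htle 0 m, if_neg htlen]
    rw [altRuns, if_pos hx]
    simp only [zero_add, List.foldl, ← ht, ← hd]
    -- resuming the fold on d with cnt = t.length gives the same .2 as with cnt = 0,
    -- because d is empty or starts with a non-qualifying stone
    have hresume : (d.foldl (stepA lt) ((t.length : Int), max m t.length)).2
        = (d.foldl (stepA lt) (0, max m t.length)).2 := by
      rcases hD : d with _ | ⟨y, d'⟩
      · rfl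
      · have hy : ¬ (y ≤ lt) := by
          have := List.head?_dropWhile_not (fun s => decide (s ≤ lt)) (x :: xs)
          rw [← hd, hD] at this
          simpa using this
        simp only [List.foldl, stepA, if_neg hy]
    rw [hresume, ih (max m t.length) (le_trans hm (le_max_left _ _))]
    rw [max_comm (0:Int) ((t.length : Int)), foldl_max_max]
    have hlen : (0:Int) ≤ (t.length : Int) := Int.natCast_nonneg _
    simp only [max_def]
    split_ifs <;> omega
  | case3 x xs hx ih =>
    intro m hm
    simp only [List.foldl, stepA, if_neg hx]
    rw [altRuns, if_neg hx]
    exact ih m hm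

-- ===== VERDICT (by name: the statement is the Claim_ definition above) =====
theorem check_spec : Claim_equal_check := by
  intro stones lt _
  unfold Spec_check check_alt
  rw [check_eq_foldl]
  have := foldA_zero lt stones 0 le_rfl
  rw [this]
  have h0 : (0:Int) ≤ (altRuns lt stones).foldl max 0 := by
    have : ∀ (l : List Int) (a : Int), a ≤ l.foldl max a := by
      intro l
      induction l with
      | nil => intro a; exact le_rfl
      | cons b l ih => intro a; exact le_trans (le_max_left a b) (ih _)
    exact this _ 0
  omega
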